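-- pv_equiv track=rewrite | github.com/itsnowkim/algorithm-study | code/gimkuku/week5/72415.py | ctrl_move
-- ===== SOURCE A (Python) =====
-- def ctrl_move(y, x, dy, dx, board):
--     ny, nx = y + dy, x + dx
--     if 0 <= ny < 4 and 0 <= nx < 4:
--         # 빈곳이면 누군가 만날때까지 보내기
--         if board[ny * 4 + nx] == '0':
--             return ctrl_move(ny, nx, dy, dx, board)
--         else:
--             return ny, nx
--     # 자리없으면 안보내기 (= 맨끝까지 보내기)
--     else:
--         return y, x
-- ===== SOURCE B (Python) =====
-- def ctrl_move(y, x, dy, dx, board):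
--     # scan for the first step index k whose cell stops the slide, then
--     # compute the answer from k by arithmetic (no per-step state carried)
--     k = 1
--     while 0 <= y + k * dy < 4 and 0 <= x + k * dx < 4 and board[(y + k * dy) * 4 + (x + k * dx)] == '0':
--         k += 1
--     ny, nx = y + k * dy, x + k * dx
--     if 0 <= ny < 4 and 0 <= nx < 4:
--         return ny, nx
--     return y + (k - 1) * dy, x + (k - 1) * dx
-- ===== Notes on version B (the rewrite author's own statement) =====
-- stated objective: alternative
-- what changed: A slides by tail recursion that re-bases (y,x) at every empty cell; B instead scans for the first step index k whose cell blocks the slide and computes the result from k by arithmetic (y+k*dy), distinguishing obstacle vs boundary in one final branch.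
import Mathlib
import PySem

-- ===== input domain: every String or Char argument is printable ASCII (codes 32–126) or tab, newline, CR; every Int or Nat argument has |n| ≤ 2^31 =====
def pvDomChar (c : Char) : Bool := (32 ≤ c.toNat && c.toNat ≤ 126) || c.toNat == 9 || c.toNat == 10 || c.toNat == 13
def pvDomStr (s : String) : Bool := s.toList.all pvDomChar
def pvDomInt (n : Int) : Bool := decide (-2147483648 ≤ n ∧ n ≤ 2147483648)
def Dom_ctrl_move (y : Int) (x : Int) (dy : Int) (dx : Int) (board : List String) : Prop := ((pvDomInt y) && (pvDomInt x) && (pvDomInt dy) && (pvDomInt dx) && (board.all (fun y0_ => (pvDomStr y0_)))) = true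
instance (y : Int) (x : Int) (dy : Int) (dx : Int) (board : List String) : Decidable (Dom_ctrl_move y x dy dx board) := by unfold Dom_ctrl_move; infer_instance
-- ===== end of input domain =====

-- B replaces A's tail recursion carrying the current cell by a scan for the
-- first blocking step index k, recovering the answer from k by arithmetic;
-- objective: alternative decomposition, same cost.

-- ===== PORT A =====
-- fuel-indexed transliteration of A's recursion; inside Pre_ctrl_move the
-- recursion depth is at most 5, so fuel 8 is never exhausted there
def pvGo (dy : Int) (dx : Int) (board : List String) : Nat → Int → Int → Int × Int
  | 0, y, x => (y, x)
  | f+1, y, x =>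
    let ny := y + dy
    let nx := x + dx
    if 0 ≤ ny ∧ ny < 4 ∧ 0 ≤ nx ∧ nx < 4 then
      if PySem.List.pyGet? board (ny * 4 + nx) = some "0" then
        pvGo dy dx board f ny nx
      else (ny, nx)
    else (y, x)

def ctrl_move (y : Int) (x : Int) (dy : Int) (dx : Int) (board : List String) : Int × Int :=
  pvGo dy dx board 8 y x

-- ===== PORT B =====
-- B's while-loop: advance the step counter k while the k-th cell is empty
def pvScan (y : Int) (x : Int) (dy : Int) (dx : Int) (board : List String) : Nat → Int → Int
  | 0, k => k
  | f+1, k =>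
    if (0 ≤ y + k * dy ∧ y + k * dy < 4 ∧ 0 ≤ x + k * dx ∧ x + k * dx < 4) ∧
       PySem.List.pyGet? board ((y + k * dy) * 4 + (x + k * dx)) = some "0" then
      pvScan y x dy dx board f (k + 1)
    else k

def ctrl_move_alt (y : Int) (x : Int) (dy : Int) (dx : Int) (board : List String) : Int × Int :=
  let k := pvScan y x dy dx board 8 1
  let ny := y + k * dy
  let nx := x + k * dx
  if 0 ≤ ny ∧ ny < 4 ∧ 0 ≤ nx ∧ nx < 4 then (ny, nx)
  else (y + (k - 1) * dy, x + (k - 1) * dx)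

-- ===== PRECONDITION & SPEC =====
-- Pre_ is exactly the condition under which Python A terminates without an
-- exception: every in-bounds cell the slide reaches must exist in `board`
-- (else IndexError), and a zero displacement must not land on an empty
-- in-bounds cell (else infinite recursion). The slide visits at most 4
-- in-bounds cells, hence the four-level unfolding.
def Pre_ctrl_move (y : Int) (x : Int) (dy : Int) (dx : Int) (board : List String) : Prop :=
  ((0 ≤ y + 1*dy ∧ y + 1*dy < 4 ∧ 0 ≤ x + 1*dx ∧ x + 1*dx < 4) → (PySem.List.pyGet? board ((y + 1*dy) * 4 + (x + 1*dx))).isSome = true) ∧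
  (((0 ≤ y + 1*dy ∧ y + 1*dy < 4 ∧ 0 ≤ x + 1*dx ∧ x + 1*dx < 4) ∧ PySem.List.pyGet? board ((y + 1*dy) * 4 + (x + 1*dx)) = some "0") → ¬(dy = 0 ∧ dx = 0)) ∧
  (((0 ≤ y + 1*dy ∧ y + 1*dy < 4 ∧ 0 ≤ x + 1*dx ∧ x + 1*dx < 4) ∧ PySem.List.pyGet? board ((y + 1*dy) * 4 + (x + 1*dx)) = some "0") ∧ (0 ≤ y + 2*dy ∧ y + 2*dy < 4 ∧ 0 ≤ x + 2*dx ∧ x + 2*dx < 4) → (PySem.List.pyGet? board ((y + 2*dy) * 4 + (x + 2*dx))).isSome = true) ∧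
  (((0 ≤ y + 1*dy ∧ y + 1*dy < 4 ∧ 0 ≤ x + 1*dx ∧ x + 1*dx < 4) ∧ PySem.List.pyGet? board ((y + 1*dy) * 4 + (x + 1*dx)) = some "0") ∧ ((0 ≤ y + 2*dy ∧ y + 2*dy < 4 ∧ 0 ≤ x + 2*dx ∧ x + 2*dx < 4) ∧ PySem.List.pyGet? board ((y + 2*dy) * 4 + (x + 2*dx)) = some "0") ∧ (0 ≤ y + 3*dy ∧ y + 3*dy < 4 ∧ 0 ≤ x + 3*dx ∧ x + 3*dx < 4) → (PySem.List.pyGet? board ((y + 3*dy) * 4 + (x + 3*dx))).isSome = true) ∧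
  (((0 ≤ y + 1*dy ∧ y + 1*dy < 4 ∧ 0 ≤ x + 1*dx ∧ x + 1*dx < 4) ∧ PySem.List.pyGet? board ((y + 1*dy) * 4 + (x + 1*dx)) = some "0") ∧ ((0 ≤ y + 2*dy ∧ y + 2*dy < 4 ∧ 0 ≤ x + 2*dx ∧ x + 2*dx < 4) ∧ PySem.List.pyGet? board ((y + 2*dy) * 4 + (x + 2*dx)) = some "0") ∧ ((0 ≤ y + 3*dy ∧ y + 3*dy < 4 ∧ 0 ≤ x + 3*dx ∧ x + 3*dx < 4) ∧ PySem.List.pyGet? board ((y + 3*dy) * 4 + (x + 3*dx)) = some "0") ∧ (0 ≤ y + 4*dy ∧ y + 4*dy < 4 ∧ 0 ≤ x + 4*dx ∧ x + 4*dx < 4) → (PySem.List.pyGet? board ((y + 4*dy) * 4 + (x + 4*dx))).isSome = true)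

instance (y : Int) (x : Int) (dy : Int) (dx : Int) (board : List String) : Decidable (Pre_ctrl_move y x dy dx board) := by
  unfold Pre_ctrl_move
  refine @instDecidableAnd _ _ ?_ (@instDecidableAnd _ _ ?_ (@instDecidableAnd _ _ ?_ (@instDecidableAnd _ _ ?_ ?_))) <;> infer_instance

def pvWitness_ctrl_move : Int × Int × Int × Int × List String :=
  (0, 0, 0, 1, ["0","0","0","0","0","0","0","0","0","0","0","0","0","0","0","0"])

def Spec_ctrl_move (y : Int) (x : Int) (dy : Int) (dx : Int) (board : List String) (out : Int × Int) : Prop := out = ctrl_move_alt y x dy dx board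
instance (y : Int) (x : Int) (dy : Int) (dx : Int) (board : List String) (out : Int × Int) : Decidable (Spec_ctrl_move y x dy dx board out) := by unfold Spec_ctrl_move; infer_instance

-- ===== CLAIM (what is proved, stated in full; the proofs are below) =====
def Claim_equal_ctrl_move : Prop := ∀ (y : Int) (x : Int) (dy : Int) (dx : Int) (board : List String), Dom_ctrl_move y x dy dx board → Pre_ctrl_move y x dy dx board → Spec_ctrl_move y x dy dx board (ctrl_move y x dy dx board)

-- ===== LEMMAS AND PROOFS =====

-- the loop/recursion condition at step index m
def pvCond (y x dy dx : Int) (board : List String) (m : Int) : Prop :=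
  (0 ≤ y + m * dy ∧ y + m * dy < 4 ∧ 0 ≤ x + m * dx ∧ x + m * dx < 4) ∧
  PySem.List.pyGet? board ((y + m * dy) * 4 + (x + m * dx)) = some "0"

lemma pvKey (y x dy dx : Int) (board : List String) :
    ∀ (f : Nat) (k : Int),
      (∃ j : Nat, j < f ∧ ¬ pvCond y x dy dx board (k + 1 + (j : Int))) →
      pvGo dy dx board f (y + k * dy) (x + k * dx) =
        (let m := pvScan y x dy dx board f (k + 1)
         if 0 ≤ y + m * dy ∧ y + m * dy < 4 ∧ 0 ≤ x + m * dx ∧ x + m * dx < 4 then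
           (y + m * dy, x + m * dx)
         else (y + (m - 1) * dy, x + (m - 1) * dx)) := by
  intro f
  induction f with
  | zero => rintro k ⟨j, hj, _⟩; exact absurd hj (by omega)
  | succ f ih =>
    rintro k ⟨j, hj, hnc⟩
    simp only [pvCond] at hnc
    by_cases hc : (0 ≤ y + (k+1) * dy ∧ y + (k+1) * dy < 4 ∧ 0 ≤ x + (k+1) * dx ∧ x + (k+1) * dx < 4) ∧
        PySem.List.pyGet? board ((y + (k+1) * dy) * 4 + (x + (k+1) * dx)) = some "0"
    · -- both continue one step
      have hj0 : j ≠ 0 := by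
        intro h; subst h
        simp only [Nat.cast_zero, add_zero] at hnc
        exact hnc hc
      have hstep : pvGo dy dx board (f+1) (y + k * dy) (x + k * dx) =
          pvGo dy dx board f (y + (k+1) * dy) (x + (k+1) * dx) := by
        simp only [pvGo]
        have e1 : y + k * dy + dy = y + (k+1) * dy := by ring
        have e2 : x + k * dx + dx = x + (k+1) * dx := by ring
        rw [e1, e2, if_pos hc.1, if_pos hc.2]
      have hscan : pvScan y x dy dx board (f+1) (k + 1) =
          pvScan y x dy dx board f (k + 1 + 1) := by
        simp only [pvScan]
        rw [if_pos hc]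
      rw [hstep, hscan]
      apply ih
      refine ⟨j - 1, by omega, ?_⟩
      simp only [pvCond]
      have e : (k + 1 + 1) + ((j - 1 : Nat) : Int) = k + 1 + (j : Int) := by omega
      rw [e]; exact hnc
    · -- both stop here
      have hscan : pvScan y x dy dx board (f+1) (k + 1) = k + 1 := by
        simp only [pvScan]
        rw [if_neg hc]
      simp only [hscan]
      simp only [pvGo]
      have e1 : y + k * dy + dy = y + (k+1) * dy := by ring
      have e2 : x + k * dx + dx = x + (k+1) * dx := by ring
      rw [e1, e2]
      by_cases hin : 0 ≤ y + (k+1) * dy ∧ y + (k+1) * dy < 4 ∧ 0 ≤ x + (k+1) * dx ∧ x + (k+1) * dx < 4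
      · have hz : ¬ PySem.List.pyGet? board ((y + (k+1) * dy) * 4 + (x + (k+1) * dx)) = some "0" :=
          fun h => hc ⟨hin, h⟩
        rw [if_pos hin, if_neg hz, if_pos hin]
      · rw [if_neg hin, if_neg hin]
        have e3 : k + 1 - 1 = k := by ring
        rw [e3]

-- inside Pre_ the loop condition fails within the first 8 steps
lemma pvExit (y x dy dx : Int) (board : List String)
    (hpre : Pre_ctrl_move y x dy dx board) :
    ∃ j : Nat, j < 8 ∧ ¬ pvCond y x dy dx board (0 + 1 + (j : Int)) := by
  by_cases hd : dy = 0 ∧ dx = 0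
  · refine ⟨0, by omega, ?_⟩
    intro hc
    simp only [pvCond, Nat.cast_zero, add_zero, zero_add] at hc
    exact hpre.2.1 hc hd
  · by_contra hall
    push_neg at hall
    have h0 : pvCond y x dy dx board 1 := by
      have := hall 0 (by omega); simpa using this
    have h4 : pvCond y x dy dx board 5 := by
      have := hall 4 (by omega); norm_num at this; exact this
    simp only [pvCond, one_mul] at h0 h4
    obtain ⟨⟨a1, a2, a3, a4⟩, -⟩ := h0
    obtain ⟨⟨b1, b2, b3, b4⟩, -⟩ := h4
    omega

-- ===== VERDICT (by name: the statement is the Claim_ definition above) =====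
theorem ctrl_move_spec : Claim_equal_ctrl_move := by
  intro y x dy dx board _ hpre
  unfold Spec_ctrl_move ctrl_move ctrl_move_alt
  have h := pvKey y x dy dx board 8 0 (pvExit y x dy dx board hpre)
  simpa using h
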